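-- pv_equiv track=rewrite | github.com/rdadan/HCPS | kg_sda - 副本 - 副本.py | getdeviceUserServerList
-- ===== SOURCE A (Python) =====
-- def getdeviceUserServerList(deviceUserID, serverUserID):
--     dicDeviceUserServer = {}
--     deviceServerID = []
--     for user in deviceUserID:
--
--         serverID = []
--         for serID, serUsers in enumerate(serverUserID):
--             if user in serUsers:
--                 serverID.append(serID)
--                 deviceServerID.append(serID)
--
--         dicDeviceUserServer[user] = serverID
--     deviceServerID = list(set(deviceServerID))
--     return dicDeviceUserServer, deviceServerID
-- ===== SOURCE B (Python) =====
-- def getdeviceUserServerList(deviceUserID, serverUserID):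
--     # One pass over the servers builds a user -> [serverID...] index (each server id
--     # appended at most once per user via the last-element check, since a server's
--     # users are processed contiguously); each device user is then an O(1) lookup.
--     index = {}
--     for serID, serUsers in enumerate(serverUserID):
--         for u in serUsers:
--             lst = index.setdefault(u, [])
--             if not lst or lst[-1] != serID:
--                 lst.append(serID)
--     dicDeviceUserServer = {user: index.get(user, []) for user in deviceUserID}
--     deviceServerID = [sid for user in deviceUserID for sid in index.get(user, [])]
--     return dicDeviceUserServer, list(set(deviceServerID))
-- ===== Notes on version B (the rewrite author's own statement) =====
-- stated objective: faster
-- what changed: Instead of scanning every server's user list once per device user, B makes one pass over the servers building a user->serverID-list index (appending each server id at most once per user via a last-element check), then answers each device user by an O(1) dict lookup and a flat comprehension.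
import Mathlib
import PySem

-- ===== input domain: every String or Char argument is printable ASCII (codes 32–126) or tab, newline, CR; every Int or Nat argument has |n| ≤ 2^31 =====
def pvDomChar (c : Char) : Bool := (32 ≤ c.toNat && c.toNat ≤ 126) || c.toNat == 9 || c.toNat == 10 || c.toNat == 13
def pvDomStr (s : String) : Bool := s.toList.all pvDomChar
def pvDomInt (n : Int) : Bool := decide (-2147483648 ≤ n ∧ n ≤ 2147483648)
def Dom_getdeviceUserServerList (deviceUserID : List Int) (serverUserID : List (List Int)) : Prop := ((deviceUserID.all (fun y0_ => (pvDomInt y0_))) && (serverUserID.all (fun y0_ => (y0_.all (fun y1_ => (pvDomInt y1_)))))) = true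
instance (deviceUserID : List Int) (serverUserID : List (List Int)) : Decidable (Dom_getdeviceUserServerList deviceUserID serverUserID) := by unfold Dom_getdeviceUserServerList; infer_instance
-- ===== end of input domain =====

-- B replaces A's per-device-user scan over all servers with one pass over the servers
-- building a user -> serverID-list index, then per-device-user O(1) lookups (objective: faster).
--
-- Both Pythons end with list(set(...)) on the collected server ids (nonnegative ints).
-- PySem does not model CPython set iteration order, so each port hand-ports it, exactly on
-- nonnegative ints: hash(n) = n, open addressing with LINEAR_PROBES = 9, perturb >> 5,
-- resize when fill*5 >= mask*3 to 4*used (2*used above 50000), table sizes 8*2^k, and a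
-- duplicate insertion is a no-op, so the machine may insert the first-occurrence-distinct
-- elements only. The two ports transcribe this machine independently (A on lists with folds,
-- B on arrays with explicit recursion); the fuel bounds exceed any probe sequence, so the
-- 0-fuel branches are unreachable.

-- ===== PORT A =====
-- linear-probe scan: first free slot among j, j+1, …; none = all occupied
def pvProbeLinA (t : List (Option Int)) : Nat → Nat → Option Nat
  | j, cnt =>
    match t.getD j none with
    | none => some j
    | some _ =>
      match cnt with
      | 0 => none
      | c + 1 => pvProbeLinA t (j + 1) c

def pvProbeA (t : List (Option Int)) (mask : Nat) : Nat → Nat → Nat → Nat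
  | _, _, 0 => 0
  | i, perturb, fuel + 1 =>
    match pvProbeLinA t i (if i + 9 ≤ mask then 9 else 0) with
    | some j => j
    | none => pvProbeA t mask ((i * 5 + 1 + (perturb >>> 5)) &&& mask) (perturb >>> 5) fuel

-- smallest admissible table size > minused, by doubling from n
def pvNewA (minused : Nat) : Nat → Nat → Nat
  | n, 0 => n
  | n, fuel + 1 => if n ≤ minused then pvNewA minused (2 * n) fuel else n

def pvPutA (t : List (Option Int)) (x : Int) : List (Option Int) :=
  t.set (pvProbeA t (t.length - 1) (x.toNat &&& (t.length - 1)) x.toNat (t.length + 64)) (some x)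

def pvStepA (st : List (Option Int) × Nat) (x : Int) : List (Option Int) × Nat :=
  let t := pvPutA st.1 x
  let fill := st.2 + 1
  if fill * 5 ≥ (st.1.length - 1) * 3 then
    let minused := if fill > 50000 then fill * 2 else fill * 4
    (t.foldl (fun acc o => match o with | none => acc | some w => pvPutA acc w)
      (List.replicate (pvNewA minused 8 64) none), fill)
  else (t, fill)

-- list(set(xs)) for nonnegative ints: insert the distinct elements, read the slots in order
def pvSetListA (xs : List Int) : List Int :=
  ((PySem.List.dedup xs).foldl pvStepA (List.replicate 8 none, 0)).1.filterMap id

def getdeviceUserServerList (deviceUserID : List Int) (serverUserID : List (List Int)) : (List (Int × List Int)) × List Int :=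
  let st := deviceUserID.foldl
    (fun (acc : PySem.Dict Int (List Int) × List Int) user =>
      let p := (PySem.List.enumerate serverUserID).foldl
        (fun (q : List Int × List Int) sp =>
          if sp.2.contains user then (q.1 ++ [sp.1], q.2 ++ [sp.1]) else q)
        ([], acc.2)
      (acc.1.insert user p.1, p.2))
    ((PySem.Dict.empty : PySem.Dict Int (List Int)), [])
  (st.1.items, pvSetListA st.2)

-- ===== PORT B =====
-- same CPython set machine, written over Array with explicit recursion
def pvSlotB (t : Array (Option Int)) (mask : Nat) : Nat → Nat → Nat → Nat
  | _, _, 0 => 0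
  | i, perturb, fuel + 1 =>
    match ((List.range (if i + 9 ≤ mask then 10 else 1)).map (i + ·)).find?
        (fun j => (t.getD j none).isNone) with
    | some j => j
    | none => pvSlotB t mask ((i * 5 + 1 + (perturb >>> 5)) &&& mask) (perturb >>> 5) fuel

def pvPutB (t : Array (Option Int)) (x : Int) : Array (Option Int) :=
  t.setIfInBounds (pvSlotB t (t.size - 1) (x.toNat &&& (t.size - 1)) x.toNat (t.size + 64)) (some x)

def pvSizeB (m : Nat) : Nat :=
  (List.range 64).foldl (fun n _ => if n ≤ m then 2 * n else n) 8

-- rehash: move the occupied slots of the old table into a fresh one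
def pvMoveB : List (Option Int) → Array (Option Int) → Array (Option Int)
  | [], t => t
  | none :: rest, t => pvMoveB rest t
  | some v :: rest, t => pvMoveB rest (pvPutB t v)

def pvLoopB : List Int → Array (Option Int) → Nat → List Int
  | [], t, _ => t.toList.flatMap (fun o => o.toList)
  | x :: rest, t, fill =>
    let t1 := pvPutB t x
    if (fill + 1) * 5 ≥ (t.size - 1) * 3 then
      let m := if fill + 1 > 50000 then (fill + 1) * 2 else (fill + 1) * 4
      pvLoopB rest (pvMoveB t1.toList (Array.replicate (pvSizeB m) none)) (fill + 1)
    else pvLoopB rest t1 (fill + 1)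

-- list(set(xs)) for nonnegative ints, B's transcription
def pvSetListB (xs : List Int) : List Int :=
  pvLoopB (PySem.Set.ofList xs) (Array.replicate 8 none) 0

-- inner loop body: 'lst = index.setdefault(u, []); if not lst or lst[-1] != serID: lst.append(serID)';
-- setdefault + in-place append is ported as insert (same key position, same value)
def pvAddB (sid : Int) (d : PySem.Dict Int (List Int)) (u : Int) : PySem.Dict Int (List Int) :=
  let lst := d.getD u []
  if lst.isEmpty || lst.getLast? != some sid then d.insert u (lst ++ [sid]) else d.insert u lst

-- 'for serID, serUsers in enumerate(serverUserID): for u in serUsers: …'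
def pvIndexB : List (List Int) → Int → PySem.Dict Int (List Int) → PySem.Dict Int (List Int)
  | [], _, d => d
  | us :: rest, sid, d => pvIndexB rest (sid + 1) (us.foldl (pvAddB sid) d)

def getdeviceUserServerList_alt (deviceUserID : List Int) (serverUserID : List (List Int)) : (List (Int × List Int)) × List Int :=
  let index := pvIndexB serverUserID 0 PySem.Dict.empty
  let dic := deviceUserID.foldl
    (fun (d : PySem.Dict Int (List Int)) user => d.insert user (index.getD user [])) PySem.Dict.empty
  let flat := deviceUserID.flatMap (fun user => index.getD user [])
  (dic.items, pvSetListB flat)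

-- ===== PRECONDITION & SPEC =====
def Spec_getdeviceUserServerList (deviceUserID : List Int) (serverUserID : List (List Int)) (out : (List (Int × List Int)) × List Int) : Prop := out = getdeviceUserServerList_alt deviceUserID serverUserID
instance (deviceUserID : List Int) (serverUserID : List (List Int)) (out : (List (Int × List Int)) × List Int) : Decidable (Spec_getdeviceUserServerList deviceUserID serverUserID out) := by unfold Spec_getdeviceUserServerList; infer_instance

-- ===== CLAIM (what is proved, stated in full; the proofs are below) =====
def Claim_equal_getdeviceUserServerList : Prop := ∀ (deviceUserID : List Int) (serverUserID : List (List Int)), Dom_getdeviceUserServerList deviceUserID serverUserID → Spec_getdeviceUserServerList deviceUserID serverUserID (getdeviceUserServerList deviceUserID serverUserID)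

-- ===== LEMMAS AND PROOFS =====

-- ## the two set-machine transcriptions agree

theorem pvProbeLin_eq_find (t : List (Option Int)) (cnt : Nat) : ∀ j,
    pvProbeLinA t j cnt
      = ((List.range (cnt + 1)).map (j + ·)).find? (fun k => (t.getD k none).isNone) := by
  induction cnt with
  | zero =>
    intro j
    unfold pvProbeLinA
    cases hg : t.getD j none <;> simp_all [List.getD]
  | succ c ih =>
    intro j
    rw [List.range_succ_eq_map]
    unfold pvProbeLinA
    have hmap : ((List.range (c + 1)).map Nat.succ).map (j + ·)
        = (List.range (c + 1)).map (j + 1 + ·) := by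
      rw [List.map_map]; apply List.map_congr_left; intro k _; simp; omega
    cases hg : t.getD j none with
    | none =>
      simp only [List.map_cons, Nat.add_zero, List.find?_cons, hg]
      rfl
    | some v =>
      simp only [List.map_cons, Nat.add_zero, List.find?_cons, hmap, hg]
      exact ih (j + 1)

theorem pvArrGetD (a : Array (Option Int)) (i : Nat) : a.getD i none = a.toList.getD i none := by
  simp [Array.getD, List.getD]
  split
  · rename_i h; simp [Array.getElem?_eq_getElem h]
  · rename_i h; simp [Array.getElem?_eq_none (Nat.le_of_not_lt h)]

theorem pvSlot_eq_probe (tB : Array (Option Int)) (tA : List (Option Int)) (h : tB.toList = tA)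
    (mask : Nat) : ∀ fuel i perturb,
    pvSlotB tB mask i perturb fuel = pvProbeA tA mask i perturb fuel := by
  intro fuel
  induction fuel with
  | zero => intro i p; rfl
  | succ f ih =>
    intro i p
    unfold pvSlotB pvProbeA
    rw [pvProbeLin_eq_find]
    have hpred : (fun j => (tB.getD j none).isNone) = (fun k => ((tA.getD k none).isNone : Bool)) := by
      funext k; rw [pvArrGetD, h]
    have hcnt : (if i + 9 ≤ mask then 10 else 1) = (if i + 9 ≤ mask then 9 else 0) + 1 := by
      split <;> rfl
    rw [hcnt, hpred]
    cases hf : ((List.range ((if i + 9 ≤ mask then 9 else 0) + 1)).map (i + ·)).find?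
        (fun k => ((tA.getD k none).isNone : Bool)) with
    | some j => rfl
    | none => exact ih _ _

theorem pvPut_eq (tB : Array (Option Int)) (tA : List (Option Int)) (h : tB.toList = tA)
    (x : Int) : (pvPutB tB x).toList = pvPutA tA x := by
  unfold pvPutB pvPutA
  rw [Array.toList_setIfInBounds, h, Array.size_eq_length_toList, h,
    pvSlot_eq_probe tB tA h]

theorem pvMove_eq (l : List (Option Int)) : ∀ (tB : Array (Option Int)) (tA : List (Option Int)),
    tB.toList = tA →
    (pvMoveB l tB).toList
      = l.foldl (fun acc o => match o with | none => acc | some w => pvPutA acc w) tA := by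
  induction l with
  | nil => intro tB tA h; simpa using h
  | cons o rest ih =>
    intro tB tA h
    cases o with
    | none => simp only [pvMoveB, List.foldl_cons]; exact ih tB tA h
    | some v =>
      simp only [pvMoveB, List.foldl_cons]
      exact ih _ _ (pvPut_eq tB tA h v)

theorem pvNewA_of_gt (m : Nat) : ∀ fuel n, ¬ n ≤ m → pvNewA m n fuel = n := by
  intro fuel
  induction fuel with
  | zero => intro n _; rfl
  | succ f ih => intro n hn; unfold pvNewA; simp [hn]

theorem pvFoldDouble (m : Nat) (l : List Unit) : ∀ n,
    l.foldl (fun n _ => if n ≤ m then 2 * n else n) n = pvNewA m n l.length := by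
  induction l with
  | nil => intro n; rfl
  | cons _ rest ih =>
    intro n
    simp only [List.foldl_cons, List.length_cons, pvNewA]
    by_cases hn : n ≤ m
    · rw [if_pos hn, if_pos hn, ih (2 * n)]
    · rw [if_neg hn, if_neg hn, ih n, pvNewA_of_gt m _ _ hn]

theorem pvSize_eq_new (m : Nat) : pvSizeB m = pvNewA m 8 64 := by
  unfold pvSizeB
  have : (List.range 64).foldl (fun n _ => if n ≤ m then 2 * n else n) 8
      = ((List.range 64).map (fun _ => ())).foldl (fun n _ => if n ≤ m then 2 * n else n) 8 := by
    rw [List.foldl_map]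
  rw [this, pvFoldDouble]
  simp

theorem pvFilterMapFlat (l : List (Option Int)) :
    l.filterMap id = l.flatMap (fun o => o.toList) := by
  induction l with
  | nil => rfl
  | cons h t ih => cases h <;> simp <;> exact ih

theorem pvLoop_eq (l : List Int) : ∀ (tB : Array (Option Int)) (tA : List (Option Int)) (fill : Nat),
    tB.toList = tA →
    pvLoopB l tB fill = (l.foldl pvStepA (tA, fill)).1.filterMap id := by
  induction l with
  | nil =>
    intro tB tA fill h
    simp only [pvLoopB, List.foldl_nil, h, pvFilterMapFlat]
  | cons x rest ih =>
    intro tB tA fill h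
    have hsz : tB.size = tA.length := by rw [Array.size_eq_length_toList, h]
    simp only [pvLoopB, List.foldl_cons, pvStepA, hsz]
    by_cases hc : (fill + 1) * 5 ≥ (tA.length - 1) * 3
    · rw [if_pos hc, if_pos hc]
      exact ih _ _ _ (by
        rw [pvMove_eq _ _ _ (by rw [Array.toList_replicate, pvSize_eq_new]),
          pvPut_eq tB tA h x])
    · rw [if_neg hc, if_neg hc]
      exact ih _ _ _ (pvPut_eq tB tA h x)

theorem pvSetList_eq (xs : List Int) : pvSetListA xs = pvSetListB xs := by
  unfold pvSetListA pvSetListB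
  rw [PySem.List.dedup_eq_ofList,
    pvLoop_eq (PySem.Set.ofList xs) (Array.replicate 8 none) (List.replicate 8 none) 0
      (Array.toList_replicate)]

theorem pvInnerA (ps : List (Int × List Int)) (user : Int) : ∀ (a b : List Int),
    ps.foldl (fun (q : List Int × List Int) sp =>
        if sp.2.contains user then (q.1 ++ [sp.1], q.2 ++ [sp.1]) else q) (a, b)
      = (a ++ (ps.filter (fun sp => sp.2.contains user)).map (·.1),
         b ++ (ps.filter (fun sp => sp.2.contains user)).map (·.1)) := by
  induction ps with
  | nil => intro a b; simp
  | cons hd tl ih =>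
    intro a b
    simp only [List.foldl_cons, List.filter_cons]
    cases h : hd.2.contains user with
    | true =>
      simp only [if_pos, List.map_cons]
      rw [ih]
      simp [List.append_assoc]
    | false =>
      simp only [if_neg, Bool.false_eq_true, not_false_iff]
      rw [ih]

theorem pvAddLoop (sid : Int) (us : List Int) (d0 : PySem.Dict Int (List Int))
    (hlt : ∀ v x, x ∈ d0.getD v [] → x < sid) :
    ∀ (seen : List Int) (d : PySem.Dict Int (List Int)),
      (∀ v, d.getD v [] = d0.getD v [] ++ (if v ∈ seen then [sid] else [])) →
      ∀ v, (us.foldl (pvAddB sid) d).getD v []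
        = d0.getD v [] ++ (if v ∈ seen ∨ v ∈ us then [sid] else []) := by
  induction us with
  | nil =>
    intro seen d hd v
    simpa using hd v
  | cons u rest ih =>
    intro seen d hd v
    simp only [List.foldl_cons]
    by_cases hu : u ∈ seen
    · -- u already handled this round: the last element is sid, nothing is appended
      have hlast : (d.getD u []).getLast? = some sid := by
        rw [hd u, if_pos hu, List.getLast?_concat]
      have hne : (d.getD u []).isEmpty = false := by
        rw [hd u, if_pos hu]; simp
      have hstep : pvAddB sid d u = d.insert u (d.getD u []) := by
        unfold pvAddB; simp [hlast, hne]
      rw [hstep]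
      have hd' : ∀ w, (d.insert u (d.getD u [])).getD w []
          = d0.getD w [] ++ (if w ∈ seen then [sid] else []) := by
        intro w
        rw [PySem.Dict.getD_insert]
        split
        · rename_i hw; subst hw; exact hd w
        · exact hd w
      rw [ih seen _ hd' v]
      by_cases hv : v = u
      · subst hv; simp [hu]
      · congr 1
        by_cases h1 : v ∈ seen <;> by_cases h2 : v ∈ rest <;>
          simp [h1, h2, List.mem_cons, hv]
    · -- first occurrence of u this round: sid is appended
      have hlst : d.getD u [] = d0.getD u [] := by rw [hd u, if_neg hu]; simp
      have hstep : pvAddB sid d u = d.insert u (d0.getD u [] ++ [sid]) := by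
        unfold pvAddB
        rw [hlst]
        cases hL : (d0.getD u []).getLast? with
        | none =>
          have : d0.getD u [] = [] := List.getLast?_eq_none_iff.mp hL
          simp [this]
        | some x =>
          have hx : x < sid := hlt u x (List.mem_of_getLast? hL)
          have : ¬ ((d0.getD u []).isEmpty || ((d0.getD u []).getLast? != some sid)) = false := by
            simp [hL]; omega
          simp only [Bool.not_eq_false] at this
          simp [this]
      rw [hstep]
      have hd' : ∀ w, (d.insert u (d0.getD u [] ++ [sid])).getD w []
          = d0.getD w [] ++ (if w ∈ u :: seen then [sid] else []) := by
        intro w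
        rw [PySem.Dict.getD_insert]
        split
        · rename_i hw; subst hw; simp
        · rename_i hw
          rw [hd w]
          congr 1
          simp [List.mem_cons, hw]
      rw [ih (u :: seen) _ hd' v]
      congr 1
      by_cases h1 : v ∈ seen <;> by_cases h2 : v ∈ rest <;> by_cases h3 : v = u <;>
        simp [h1, h2, h3, List.mem_cons]

theorem pvIndexB_getD (rest : List (List Int)) : ∀ (sid : Int) (d : PySem.Dict Int (List Int)),
    (∀ v x, x ∈ d.getD v [] → x < sid) →
    ∀ u, (pvIndexB rest sid d).getD u []
      = d.getD u [] ++ ((PySem.List.enumerate rest sid).filter (fun sp => sp.2.contains u)).map (·.1) := by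
  induction rest with
  | nil => intro sid d _ u; simp [pvIndexB, PySem.List.enumerate_nil]
  | cons us rest' ih =>
    intro sid d hlt u
    simp only [pvIndexB, PySem.List.enumerate_cons, List.filter_cons]
    have hfold : ∀ v, (us.foldl (pvAddB sid) d).getD v []
        = d.getD v [] ++ (if v ∈ us then [sid] else []) := by
      intro v
      have := pvAddLoop sid us d hlt [] d (by intro w; simp) v
      simpa using this
    have hlt' : ∀ v x, x ∈ (us.foldl (pvAddB sid) d).getD v [] → x < sid + 1 := by
      intro v x hx
      rw [hfold v] at hx
      rcases List.mem_append.mp hx with h1 | h2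
      · exact lt_trans (hlt v x h1) (by omega)
      · split at h2
        · simp at h2; omega
        · simp at h2
    rw [ih (sid + 1) _ hlt' u, hfold u]
    by_cases hu : u ∈ us
    · simp [hu, List.append_assoc]
    · simp [hu]

theorem getdeviceUserServerList_eq (deviceUserID : List Int) (serverUserID : List (List Int)) :
    getdeviceUserServerList deviceUserID serverUserID
      = getdeviceUserServerList_alt deviceUserID serverUserID := by
  simp only [getdeviceUserServerList, getdeviceUserServerList_alt]
  have hidx : ∀ u, (pvIndexB serverUserID 0 PySem.Dict.empty).getD u []
      = ((PySem.List.enumerate serverUserID).filter (fun sp => sp.2.contains u)).map (·.1) := by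
    intro u
    rw [pvIndexB_getD serverUserID 0 PySem.Dict.empty (by intro v x hx; simp at hx) u]
    simp
  have hA : deviceUserID.foldl
      (fun (acc : PySem.Dict Int (List Int) × List Int) user =>
        let p := (PySem.List.enumerate serverUserID).foldl
          (fun (q : List Int × List Int) sp =>
            if sp.2.contains user then (q.1 ++ [sp.1], q.2 ++ [sp.1]) else q)
          ([], acc.2)
        (acc.1.insert user p.1, p.2))
      ((PySem.Dict.empty : PySem.Dict Int (List Int)), [])
    = deviceUserID.foldl
      (fun (acc : PySem.Dict Int (List Int) × List Int) user =>
        (acc.1.insert user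
          (((PySem.List.enumerate serverUserID).filter (fun sp => sp.2.contains user)).map (·.1)),
         acc.2 ++ ((PySem.List.enumerate serverUserID).filter (fun sp => sp.2.contains user)).map (·.1)))
      ((PySem.Dict.empty : PySem.Dict Int (List Int)), []) := by
    apply List.foldl_ext
    intro acc user _
    simp only [pvInnerA, List.nil_append]
  rw [hA,
    PySem.List.foldl_prod_mk
      (f := fun (s : PySem.Dict Int (List Int)) (user : Int) =>
        s.insert user (((PySem.List.enumerate serverUserID).filter (fun sp => sp.2.contains user)).map (·.1)))
      (g := fun (s : List Int) (user : Int) =>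
        s ++ ((PySem.List.enumerate serverUserID).filter (fun sp => sp.2.contains user)).map (·.1))]
  rw [PySem.List.foldl_append_eq_flatMap]
  simp only [hidx, List.nil_append, pvSetList_eq]

-- ===== VERDICT (by name: the statement is the Claim_ definition above) =====
theorem getdeviceUserServerList_spec : Claim_equal_getdeviceUserServerList := by
  intro d s _
  exact getdeviceUserServerList_eq d s
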